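-- pv_equiv track=rewrite | github.com/rmerg639/AndraeusAi-research | evaluation/run_scale_1000_test.py | generate_test_questions
-- ===== SOURCE A (Python) =====
-- from typing import List, Dict, Tuple
--
-- def generate_test_questions(facts: Dict[str, str], n_per_tier: int = 25) -> Dict[str, List[Dict]]:
--     """Generate test questions organized by tier."""
--     tests = {
--         "tier1_simple": [],
--         "tier2_relational": [],
--         "tier3_temporal": [],
--         "tier4_multihop": []
--     }
--
--     for key, value in facts.items():
--         if key.startswith("person_") and any(x in key for x in ["name", "age", "city", "occupation", "hobby", "food", "color", "pet", "birthday"]):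
--             if len(tests["tier1_simple"]) < n_per_tier:
--                 tests["tier1_simple"].append({
--                     "question": f"What is {key.replace('_', ' ')}?",
--                     "expected": value,
--                     "key": key
--                 })
--         elif any(x in key for x in ["spouse", "partner", "friend", "sibling", "parent", "child", "colleague", "mentor"]):
--             if len(tests["tier2_relational"]) < n_per_tier:
--                 tests["tier2_relational"].append({
--                     "question": f"Who is {key.replace('_', ' ')}?",
--                     "expected": value,
--                     "key": key
--                 })
--         elif key.startswith("event_"):
--             if len(tests["tier3_temporal"]) < n_per_tier:
--                 tests["tier3_temporal"].append({
--                     "question": f"When did {key.replace('_', ' ').replace('event ', '')} happen?",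
--                     "expected": value,
--                     "key": key
--                 })
--         elif key.startswith("chain_") or key.startswith("duration_") or key.startswith("preference_") or key.startswith("combined_"):
--             if len(tests["tier4_multihop"]) < n_per_tier:
--                 tests["tier4_multihop"].append({
--                     "question": f"Tell me about {key.replace('_', ' ')}",
--                     "expected": value,
--                     "key": key
--                 })
--
--     return tests
-- ===== SOURCE B (Python) =====
-- from typing import List, Dict, Tuple
--
-- _NAMES = ["tier1_simple", "tier2_relational", "tier3_temporal", "tier4_multihop"]
--
-- def _raw(t, key):
--     if t == 0:
--         return key.startswith("person_") and any(x in key for x in ["name", "age", "city", "occupation", "hobby", "food", "color", "pet", "birthday"])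
--     if t == 1:
--         return any(x in key for x in ["spouse", "partner", "friend", "sibling", "parent", "child", "colleague", "mentor"])
--     if t == 2:
--         return key.startswith("event_")
--     if t == 3:
--         return key.startswith(("chain_", "duration_", "preference_", "combined_"))
--     return False
--
-- def _pred(t, key):
--     return _raw(t, key) and not any(_raw(s, key) for s in range(t))
--
-- def _format(t, key):
--     spaced = key.replace("_", " ")
--     if t == 0:
--         return f"What is {spaced}?"
--     if t == 1:
--         return f"Who is {spaced}?"
--     if t == 2:
--         return f"When did {spaced.replace('event ', '')} happen?"
--     return f"Tell me about {spaced}"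
--
-- def generate_test_questions(facts: Dict[str, str], n_per_tier: int = 25) -> Dict[str, List[Dict]]:
--     """Four independent passes over the facts: tier t's questions are the first
--     n_per_tier facts whose key matches tier t's raw predicate and no earlier tier's."""
--     cap = max(n_per_tier, 0)
--     return {
--         _NAMES[t]: [{"question": _format(t, k), "expected": v, "key": k}
--                     for k, v in [kv for kv in facts.items() if _pred(t, kv[0])][:cap]]
--         for t in range(4)
--     }
-- ===== Notes on version B (the rewrite author's own statement) =====
-- stated objective: alternative
-- what changed: A makes one pass with a cascaded if/elif maintaining four capped accumulator lists in shared state; B makes four independent passes, one per tier, each filtering the facts by that tier's predicate (raw match and no earlier tier matches), slicing to n_per_tier and formatting the questions.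
import Mathlib
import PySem

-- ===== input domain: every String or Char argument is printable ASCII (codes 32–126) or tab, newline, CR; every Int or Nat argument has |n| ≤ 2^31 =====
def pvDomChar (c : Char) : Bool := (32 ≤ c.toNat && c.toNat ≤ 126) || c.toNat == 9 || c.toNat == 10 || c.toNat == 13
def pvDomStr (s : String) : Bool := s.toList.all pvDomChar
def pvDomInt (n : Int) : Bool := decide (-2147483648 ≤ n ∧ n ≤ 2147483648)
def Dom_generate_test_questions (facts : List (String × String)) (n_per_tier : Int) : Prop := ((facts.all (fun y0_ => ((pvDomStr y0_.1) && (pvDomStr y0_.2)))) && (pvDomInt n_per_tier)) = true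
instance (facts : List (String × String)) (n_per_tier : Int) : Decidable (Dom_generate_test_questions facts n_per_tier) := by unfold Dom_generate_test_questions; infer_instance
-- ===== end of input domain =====

-- B replaces A's single cascaded loop with four independent filter-slice-format passes, one per tier (objective: alternative decomposition, same cost).

-- ===== PORT A =====
-- A's loop body: cascaded if/elif with a per-tier cap checked at append time.
def pvStepA (n_per_tier : Int)
    (s : List (List (String × String)) × List (List (String × String)) × List (List (String × String)) × List (List (String × String)))
    (kv : String × String) :
    List (List (String × String)) × List (List (String × String)) × List (List (String × String)) × List (List (String × String)) :=
  let key := kv.1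
  let value := kv.2
  if PySem.Str.startswith key "person_" &&
      (["name", "age", "city", "occupation", "hobby", "food", "color", "pet", "birthday"].any
        (fun x => PySem.Str.isIn x key)) then
    if (s.1.length : Int) < n_per_tier then
      (s.1 ++ [[("question", "What is " ++ PySem.Str.replace key "_" " " ++ "?"), ("expected", value), ("key", key)]],
       s.2.1, s.2.2.1, s.2.2.2)
    else s
  else if ["spouse", "partner", "friend", "sibling", "parent", "child", "colleague", "mentor"].any
      (fun x => PySem.Str.isIn x key) then
    if (s.2.1.length : Int) < n_per_tier then
      (s.1,
       s.2.1 ++ [[("question", "Who is " ++ PySem.Str.replace key "_" " " ++ "?"), ("expected", value), ("key", key)]],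
       s.2.2.1, s.2.2.2)
    else s
  else if PySem.Str.startswith key "event_" then
    if (s.2.2.1.length : Int) < n_per_tier then
      (s.1, s.2.1,
       s.2.2.1 ++ [[("question", "When did " ++ PySem.Str.replace (PySem.Str.replace key "_" " ") "event " "" ++ " happen?"), ("expected", value), ("key", key)]],
       s.2.2.2)
    else s
  else if PySem.Str.startswith key "chain_" || PySem.Str.startswith key "duration_" ||
      PySem.Str.startswith key "preference_" || PySem.Str.startswith key "combined_" then
    if (s.2.2.2.length : Int) < n_per_tier then
      (s.1, s.2.1, s.2.2.1,
       s.2.2.2 ++ [[("question", "Tell me about " ++ PySem.Str.replace key "_" " "), ("expected", value), ("key", key)]])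
    else s
  else s

def generate_test_questions (facts : List (String × String)) (n_per_tier : Int) :
    List (String × List (List (String × String))) :=
  let s := (PySem.Dict.ofList facts).items.foldl (pvStepA n_per_tier) ([], [], [], [])
  [("tier1_simple", s.1), ("tier2_relational", s.2.1), ("tier3_temporal", s.2.2.1), ("tier4_multihop", s.2.2.2)]

-- ===== PORT B =====
-- B's raw per-tier predicate (_raw in Source B).
def pvRaw (t : Nat) (key : String) : Bool :=
  match t with
  | 0 => PySem.Str.startswith key "person_" &&
      (["name", "age", "city", "occupation", "hobby", "food", "color", "pet", "birthday"].any
        (fun x => PySem.Str.isIn x key))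
  | 1 => ["spouse", "partner", "friend", "sibling", "parent", "child", "colleague", "mentor"].any
      (fun x => PySem.Str.isIn x key)
  | 2 => PySem.Str.startswith key "event_"
  | 3 => PySem.Str.startswith key "chain_" || PySem.Str.startswith key "duration_" ||
      PySem.Str.startswith key "preference_" || PySem.Str.startswith key "combined_"
  | _ => false

-- _pred in Source B: raw match and no earlier tier matches.
def pvPred (t : Nat) (key : String) : Bool :=
  pvRaw t key && !((List.range t).any (fun s => pvRaw s key))

-- _format in Source B.
def pvQuestion (t : Nat) (key : String) : String :=
  if t = 0 then "What is " ++ PySem.Str.replace key "_" " " ++ "?"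
  else if t = 1 then "Who is " ++ PySem.Str.replace key "_" " " ++ "?"
  else if t = 2 then "When did " ++ PySem.Str.replace (PySem.Str.replace key "_" " ") "event " "" ++ " happen?"
  else "Tell me about " ++ PySem.Str.replace key "_" " "

def pvMk (t : Nat) (kv : String × String) : List (String × String) :=
  [("question", pvQuestion t kv.1), ("expected", kv.2), ("key", kv.1)]

def pvNames : List String := ["tier1_simple", "tier2_relational", "tier3_temporal", "tier4_multihop"]

def generate_test_questions_alt (facts : List (String × String)) (n_per_tier : Int) :
    List (String × List (List (String × String))) :=
  let items := (PySem.Dict.ofList facts).items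
  let cap := n_per_tier.toNat   -- max(n_per_tier, 0)
  (List.range 4).map (fun t =>
    (pvNames.getD t "",
     ((items.filter (fun kv => pvPred t kv.1)).take cap).map (pvMk t)))

-- ===== PRECONDITION & SPEC =====
def Spec_generate_test_questions (facts : List (String × String)) (n_per_tier : Int) (out : List (String × List (List (String × String)))) : Prop := out = generate_test_questions_alt facts n_per_tier
instance (facts : List (String × String)) (n_per_tier : Int) (out : List (String × List (List (String × String)))) : Decidable (Spec_generate_test_questions facts n_per_tier out) := by unfold Spec_generate_test_questions; infer_instance

-- ===== CLAIM (what is proved, stated in full; the proofs are below) =====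
def Claim_equal_generate_test_questions : Prop := ∀ (facts : List (String × String)) (n_per_tier : Int), Dom_generate_test_questions facts n_per_tier → Spec_generate_test_questions facts n_per_tier (generate_test_questions facts n_per_tier)

-- ===== LEMMAS AND PROOFS =====

-- Proof-side tier classifier characterising A's cascade, written over pvRaw.
def pvTierOf (key : String) : Option Nat :=
  if pvRaw 0 key then some 0
  else if pvRaw 1 key then some 1
  else if pvRaw 2 key then some 2
  else if pvRaw 3 key then some 3
  else none

def pvFilt (t : Nat) (l : List (String × String)) : List (String × String) :=
  l.filter (fun kv => pvTierOf kv.1 == some t)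

lemma pvPred_eq (t : Nat) (ht : t < 4) (key : String) :
    pvPred t key = (pvTierOf key == some t) := by
  interval_cases t <;>
    (cases h0 : pvRaw 0 key <;> cases h1 : pvRaw 1 key <;> cases h2 : pvRaw 2 key <;>
      cases h3 : pvRaw 3 key <;>
      simp [pvPred, pvTierOf, h0, h1, h2, h3, List.range_succ])

lemma pvFilt_eq (t : Nat) (ht : t < 4) (l : List (String × String)) :
    l.filter (fun kv => pvPred t kv.1) = pvFilt t l := by
  unfold pvFilt
  congr 1
  funext kv
  exact pvPred_eq t ht kv.1

lemma pvFoldA (n : Int) (l : List (String × String))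
    (a0 a1 a2 a3 : List (String × String)) :
    l.foldl (pvStepA n) (a0.map (pvMk 0), a1.map (pvMk 1), a2.map (pvMk 2), a3.map (pvMk 3)) =
      ((a0 ++ (pvFilt 0 l).take (n.toNat - a0.length)).map (pvMk 0),
       (a1 ++ (pvFilt 1 l).take (n.toNat - a1.length)).map (pvMk 1),
       (a2 ++ (pvFilt 2 l).take (n.toNat - a2.length)).map (pvMk 2),
       (a3 ++ (pvFilt 3 l).take (n.toNat - a3.length)).map (pvMk 3)) := by
  induction l generalizing a0 a1 a2 a3 with
  | nil => simp [pvFilt]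
  | cons kv t ih =>
    simp only [List.foldl_cons]
    by_cases h1 : (PySem.Str.startswith kv.1 "person_" &&
        (["name", "age", "city", "occupation", "hobby", "food", "color", "pet", "birthday"].any
          (fun x => PySem.Str.isIn x kv.1))) = true
    · have ht : pvTierOf kv.1 = some 0 := by
        simp only [pvTierOf, pvRaw]; rw [if_pos h1]
      by_cases hc : a0.length < n.toNat
      · have hcap : (((a0.map (pvMk 0)).length : Int) < n) := by
          simp only [List.length_map]; omega
        have hstep : pvStepA n (a0.map (pvMk 0), a1.map (pvMk 1), a2.map (pvMk 2), a3.map (pvMk 3)) kv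
            = ((a0 ++ [kv]).map (pvMk 0), a1.map (pvMk 1), a2.map (pvMk 2), a3.map (pvMk 3)) := by
          simp only [pvStepA]
          rw [if_pos h1, if_pos hcap]
          simp [pvMk, pvQuestion]
        rw [hstep, ih]
        have hfc : pvFilt 0 (kv :: t) = kv :: pvFilt 0 t := by
          simp [pvFilt, ht]
        have hfo1 : pvFilt 1 (kv :: t) = pvFilt 1 t := by
          simp [pvFilt, ht]
        have hfo2 : pvFilt 2 (kv :: t) = pvFilt 2 t := by
          simp [pvFilt, ht]
        have hfo3 : pvFilt 3 (kv :: t) = pvFilt 3 t := by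
          simp [pvFilt, ht]
        have htake : (kv :: pvFilt 0 t).take (n.toNat - a0.length)
            = kv :: (pvFilt 0 t).take (n.toNat - (a0 ++ [kv]).length) := by
          rcases Nat.exists_eq_add_of_lt hc with ⟨k, hk⟩
          have h1' : n.toNat - a0.length = k + 1 := by omega
          have h2' : n.toNat - (a0 ++ [kv]).length = k := by simp; omega
          rw [h1', h2', List.take_succ_cons]
        rw [hfc, hfo1, hfo2, hfo3, htake]
        simp [List.append_assoc]
      · have hcap : ¬ (((a0.map (pvMk 0)).length : Int) < n) := by
          simp only [List.length_map]; omega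
        have hstep : pvStepA n (a0.map (pvMk 0), a1.map (pvMk 1), a2.map (pvMk 2), a3.map (pvMk 3)) kv = (a0.map (pvMk 0), a1.map (pvMk 1), a2.map (pvMk 2), a3.map (pvMk 3)) := by
          simp only [pvStepA]
          rw [if_pos h1, if_neg hcap]
        rw [hstep, ih]
        have hz : n.toNat - a0.length = 0 := by omega
        have hfc : pvFilt 0 (kv :: t) = kv :: pvFilt 0 t := by
          simp [pvFilt, ht]
        have hfo1 : pvFilt 1 (kv :: t) = pvFilt 1 t := by
          simp [pvFilt, ht]
        have hfo2 : pvFilt 2 (kv :: t) = pvFilt 2 t := by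
          simp [pvFilt, ht]
        have hfo3 : pvFilt 3 (kv :: t) = pvFilt 3 t := by
          simp [pvFilt, ht]
        rw [hfc, hfo1, hfo2, hfo3, hz]
        simp
    ·
      by_cases h2 : (["spouse", "partner", "friend", "sibling", "parent", "child", "colleague", "mentor"].any
          (fun x => PySem.Str.isIn x kv.1)) = true
      · have ht : pvTierOf kv.1 = some 1 := by
          simp only [pvTierOf, pvRaw]; rw [if_neg h1, if_pos h2]
        by_cases hc : a1.length < n.toNat
        · have hcap : (((a1.map (pvMk 1)).length : Int) < n) := by
            simp only [List.length_map]; omega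
          have hstep : pvStepA n (a0.map (pvMk 0), a1.map (pvMk 1), a2.map (pvMk 2), a3.map (pvMk 3)) kv
              = (a0.map (pvMk 0), (a1 ++ [kv]).map (pvMk 1), a2.map (pvMk 2), a3.map (pvMk 3)) := by
            simp only [pvStepA]
            rw [if_neg h1, if_pos h2, if_pos hcap]
            simp [pvMk, pvQuestion]
          rw [hstep, ih]
          have hfc : pvFilt 1 (kv :: t) = kv :: pvFilt 1 t := by
            simp [pvFilt, ht]
          have hfo0 : pvFilt 0 (kv :: t) = pvFilt 0 t := by
            simp [pvFilt, ht]
          have hfo2 : pvFilt 2 (kv :: t) = pvFilt 2 t := by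
            simp [pvFilt, ht]
          have hfo3 : pvFilt 3 (kv :: t) = pvFilt 3 t := by
            simp [pvFilt, ht]
          have htake : (kv :: pvFilt 1 t).take (n.toNat - a1.length)
              = kv :: (pvFilt 1 t).take (n.toNat - (a1 ++ [kv]).length) := by
            rcases Nat.exists_eq_add_of_lt hc with ⟨k, hk⟩
            have h1' : n.toNat - a1.length = k + 1 := by omega
            have h2' : n.toNat - (a1 ++ [kv]).length = k := by simp; omega
            rw [h1', h2', List.take_succ_cons]
          rw [hfc, hfo0, hfo2, hfo3, htake]
          simp [List.append_assoc]
        · have hcap : ¬ (((a1.map (pvMk 1)).length : Int) < n) := by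
            simp only [List.length_map]; omega
          have hstep : pvStepA n (a0.map (pvMk 0), a1.map (pvMk 1), a2.map (pvMk 2), a3.map (pvMk 3)) kv = (a0.map (pvMk 0), a1.map (pvMk 1), a2.map (pvMk 2), a3.map (pvMk 3)) := by
            simp only [pvStepA]
            rw [if_neg h1, if_pos h2, if_neg hcap]
          rw [hstep, ih]
          have hz : n.toNat - a1.length = 0 := by omega
          have hfc : pvFilt 1 (kv :: t) = kv :: pvFilt 1 t := by
            simp [pvFilt, ht]
          have hfo0 : pvFilt 0 (kv :: t) = pvFilt 0 t := by
            simp [pvFilt, ht]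
          have hfo2 : pvFilt 2 (kv :: t) = pvFilt 2 t := by
            simp [pvFilt, ht]
          have hfo3 : pvFilt 3 (kv :: t) = pvFilt 3 t := by
            simp [pvFilt, ht]
          rw [hfc, hfo0, hfo2, hfo3, hz]
          simp
      ·
        by_cases h3 : PySem.Str.startswith kv.1 "event_" = true
        · have ht : pvTierOf kv.1 = some 2 := by
            simp only [pvTierOf, pvRaw]; rw [if_neg h1, if_neg h2, if_pos h3]
          by_cases hc : a2.length < n.toNat
          · have hcap : (((a2.map (pvMk 2)).length : Int) < n) := by
              simp only [List.length_map]; omega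
            have hstep : pvStepA n (a0.map (pvMk 0), a1.map (pvMk 1), a2.map (pvMk 2), a3.map (pvMk 3)) kv
                = (a0.map (pvMk 0), a1.map (pvMk 1), (a2 ++ [kv]).map (pvMk 2), a3.map (pvMk 3)) := by
              simp only [pvStepA]
              rw [if_neg h1, if_neg h2, if_pos h3, if_pos hcap]
              simp [pvMk, pvQuestion]
            rw [hstep, ih]
            have hfc : pvFilt 2 (kv :: t) = kv :: pvFilt 2 t := by
              simp [pvFilt, ht]
            have hfo0 : pvFilt 0 (kv :: t) = pvFilt 0 t := by
              simp [pvFilt, ht]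
            have hfo1 : pvFilt 1 (kv :: t) = pvFilt 1 t := by
              simp [pvFilt, ht]
            have hfo3 : pvFilt 3 (kv :: t) = pvFilt 3 t := by
              simp [pvFilt, ht]
            have htake : (kv :: pvFilt 2 t).take (n.toNat - a2.length)
                = kv :: (pvFilt 2 t).take (n.toNat - (a2 ++ [kv]).length) := by
              rcases Nat.exists_eq_add_of_lt hc with ⟨k, hk⟩
              have h1' : n.toNat - a2.length = k + 1 := by omega
              have h2' : n.toNat - (a2 ++ [kv]).length = k := by simp; omega
              rw [h1', h2', List.take_succ_cons]
            rw [hfc, hfo0, hfo1, hfo3, htake]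
            simp [List.append_assoc]
          · have hcap : ¬ (((a2.map (pvMk 2)).length : Int) < n) := by
              simp only [List.length_map]; omega
            have hstep : pvStepA n (a0.map (pvMk 0), a1.map (pvMk 1), a2.map (pvMk 2), a3.map (pvMk 3)) kv = (a0.map (pvMk 0), a1.map (pvMk 1), a2.map (pvMk 2), a3.map (pvMk 3)) := by
              simp only [pvStepA]
              rw [if_neg h1, if_neg h2, if_pos h3, if_neg hcap]
            rw [hstep, ih]
            have hz : n.toNat - a2.length = 0 := by omega
            have hfc : pvFilt 2 (kv :: t) = kv :: pvFilt 2 t := by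
              simp [pvFilt, ht]
            have hfo0 : pvFilt 0 (kv :: t) = pvFilt 0 t := by
              simp [pvFilt, ht]
            have hfo1 : pvFilt 1 (kv :: t) = pvFilt 1 t := by
              simp [pvFilt, ht]
            have hfo3 : pvFilt 3 (kv :: t) = pvFilt 3 t := by
              simp [pvFilt, ht]
            rw [hfc, hfo0, hfo1, hfo3, hz]
            simp
        ·
          by_cases h4 : (PySem.Str.startswith kv.1 "chain_" || PySem.Str.startswith kv.1 "duration_" ||
          PySem.Str.startswith kv.1 "preference_" || PySem.Str.startswith kv.1 "combined_") = true
          · have ht : pvTierOf kv.1 = some 3 := by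
              simp only [pvTierOf, pvRaw]; rw [if_neg h1, if_neg h2, if_neg h3, if_pos h4]
            by_cases hc : a3.length < n.toNat
            · have hcap : (((a3.map (pvMk 3)).length : Int) < n) := by
                simp only [List.length_map]; omega
              have hstep : pvStepA n (a0.map (pvMk 0), a1.map (pvMk 1), a2.map (pvMk 2), a3.map (pvMk 3)) kv
                  = (a0.map (pvMk 0), a1.map (pvMk 1), a2.map (pvMk 2), (a3 ++ [kv]).map (pvMk 3)) := by
                simp only [pvStepA]
                rw [if_neg h1, if_neg h2, if_neg h3, if_pos h4, if_pos hcap]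
                simp [pvMk, pvQuestion]
              rw [hstep, ih]
              have hfc : pvFilt 3 (kv :: t) = kv :: pvFilt 3 t := by
                simp [pvFilt, ht]
              have hfo0 : pvFilt 0 (kv :: t) = pvFilt 0 t := by
                simp [pvFilt, ht]
              have hfo1 : pvFilt 1 (kv :: t) = pvFilt 1 t := by
                simp [pvFilt, ht]
              have hfo2 : pvFilt 2 (kv :: t) = pvFilt 2 t := by
                simp [pvFilt, ht]
              have htake : (kv :: pvFilt 3 t).take (n.toNat - a3.length)
                  = kv :: (pvFilt 3 t).take (n.toNat - (a3 ++ [kv]).length) := by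
                rcases Nat.exists_eq_add_of_lt hc with ⟨k, hk⟩
                have h1' : n.toNat - a3.length = k + 1 := by omega
                have h2' : n.toNat - (a3 ++ [kv]).length = k := by simp; omega
                rw [h1', h2', List.take_succ_cons]
              rw [hfc, hfo0, hfo1, hfo2, htake]
              simp [List.append_assoc]
            · have hcap : ¬ (((a3.map (pvMk 3)).length : Int) < n) := by
                simp only [List.length_map]; omega
              have hstep : pvStepA n (a0.map (pvMk 0), a1.map (pvMk 1), a2.map (pvMk 2), a3.map (pvMk 3)) kv = (a0.map (pvMk 0), a1.map (pvMk 1), a2.map (pvMk 2), a3.map (pvMk 3)) := by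
                simp only [pvStepA]
                rw [if_neg h1, if_neg h2, if_neg h3, if_pos h4, if_neg hcap]
              rw [hstep, ih]
              have hz : n.toNat - a3.length = 0 := by omega
              have hfc : pvFilt 3 (kv :: t) = kv :: pvFilt 3 t := by
                simp [pvFilt, ht]
              have hfo0 : pvFilt 0 (kv :: t) = pvFilt 0 t := by
                simp [pvFilt, ht]
              have hfo1 : pvFilt 1 (kv :: t) = pvFilt 1 t := by
                simp [pvFilt, ht]
              have hfo2 : pvFilt 2 (kv :: t) = pvFilt 2 t := by
                simp [pvFilt, ht]
              rw [hfc, hfo0, hfo1, hfo2, hz]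
              simp
          ·
            have ht : pvTierOf kv.1 = none := by
              simp only [pvTierOf, pvRaw]; rw [if_neg h1, if_neg h2, if_neg h3, if_neg h4]
            have hstep : pvStepA n (a0.map (pvMk 0), a1.map (pvMk 1), a2.map (pvMk 2), a3.map (pvMk 3)) kv = (a0.map (pvMk 0), a1.map (pvMk 1), a2.map (pvMk 2), a3.map (pvMk 3)) := by
              simp only [pvStepA]
              rw [if_neg h1, if_neg h2, if_neg h3, if_neg h4]
            rw [hstep, ih]
            have hfo0 : pvFilt 0 (kv :: t) = pvFilt 0 t := by
              simp [pvFilt, ht]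
            have hfo1 : pvFilt 1 (kv :: t) = pvFilt 1 t := by
              simp [pvFilt, ht]
            have hfo2 : pvFilt 2 (kv :: t) = pvFilt 2 t := by
              simp [pvFilt, ht]
            have hfo3 : pvFilt 3 (kv :: t) = pvFilt 3 t := by
              simp [pvFilt, ht]
            rw [hfo0, hfo1, hfo2, hfo3]

-- ===== VERDICT (by name: the statement is the Claim_ definition above) =====
theorem generate_test_questions_spec : Claim_equal_generate_test_questions := by
  intro facts n _
  unfold Spec_generate_test_questions generate_test_questions generate_test_questions_alt
  have hA := pvFoldA n (PySem.Dict.ofList facts).items [] [] [] []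
  simp only [List.map_nil] at hA
  rw [hA]
  have e0 := pvFilt_eq 0 (by norm_num) (PySem.Dict.ofList facts).items
  have e1 := pvFilt_eq 1 (by norm_num) (PySem.Dict.ofList facts).items
  have e2 := pvFilt_eq 2 (by norm_num) (PySem.Dict.ofList facts).items
  have e3 := pvFilt_eq 3 (by norm_num) (PySem.Dict.ofList facts).items
  simp [List.range_succ, pvNames, e0, e1, e2, e3, List.map_take]
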